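-- pv_equiv track=rewrite | github.com/ellach/DeepLearning-ASS3 | plot.py | number_of_sentences
-- ===== SOURCE A (Python) =====
-- def number_of_sentences(lengths):
--     arr = []
--     count = 0
--     for i in range(0,len(lengths)):
--         if not i%500 == 0:
--            count += 1
--         else:
--            arr.append(int(count/100))
--            count += 1
--     return arr[:6]
-- ===== SOURCE B (Python) =====
-- def number_of_sentences(lengths):
--     # Closed form: A appends int(i/100) exactly at i = 0, 500, 1000, ... (where count == i),
--     # i.e. value 5*k for each k with 500*k < len(lengths); the slice keeps the first six.
--     n = len(lengths)
--     return [5 * k for k in range(min(6, -(-n // 500)))]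
-- ===== Notes on version B (the rewrite author's own statement) =====
-- stated objective: faster
-- what changed: Replaced A's O(n) loop over every index (appending int(count/100) whenever i%500==0, with count always equal to i) by the closed form [5*k for k in range(min(6, ceil(n/500)))].
import Mathlib
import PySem

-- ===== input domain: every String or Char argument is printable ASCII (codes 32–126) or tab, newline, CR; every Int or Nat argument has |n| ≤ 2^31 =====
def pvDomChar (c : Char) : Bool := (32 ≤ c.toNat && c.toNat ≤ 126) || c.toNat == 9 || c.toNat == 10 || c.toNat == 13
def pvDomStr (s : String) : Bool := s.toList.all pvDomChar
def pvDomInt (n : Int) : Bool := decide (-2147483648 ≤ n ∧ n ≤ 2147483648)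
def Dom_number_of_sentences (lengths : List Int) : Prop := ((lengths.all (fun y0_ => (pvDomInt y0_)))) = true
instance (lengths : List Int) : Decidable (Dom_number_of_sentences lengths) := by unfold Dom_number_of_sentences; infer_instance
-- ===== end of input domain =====

-- B replaces A's linear scan over all indices by the closed form [5*k for 500*k < len(lengths)],
-- capped at six entries (objective: faster, O(1) in the list length vs O(n)).

-- ===== PORT A =====
-- count is always the loop index i (hence ≥ 0), so int(count/100) = count // 100 exactly.
def number_of_sentences (lengths : List Int) : List Int :=
  let st := (PySem.List.pyRange 0 (lengths.length : Int) 1).foldl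
    (fun (p : List Int × Int) i =>
      if ¬ (PySem.Int.mod i 500 == 0) then (p.1, p.2 + 1)
      else (p.1 ++ [PySem.Int.floordiv p.2 100], p.2 + 1))
    ([], 0)
  PySem.List.slice st.1 none (some 6)

-- ===== PORT B =====
def number_of_sentences_alt (lengths : List Int) : List Int :=
  let n : Int := (lengths.length : Int)
  let m : Int := min 6 (-(PySem.Int.floordiv (-n) 500))
  (PySem.List.pyRange 0 m 1).map (fun k => 5 * k)

-- ===== PRECONDITION & SPEC =====
def Spec_number_of_sentences (lengths : List Int) (out : List Int) : Prop := out = number_of_sentences_alt lengths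
instance (lengths : List Int) (out : List Int) : Decidable (Spec_number_of_sentences lengths out) := by unfold Spec_number_of_sentences; infer_instance

-- ===== CLAIM (what is proved, stated in full; the proofs are below) =====
def Claim_equal_number_of_sentences : Prop := ∀ (lengths : List Int), Dom_number_of_sentences lengths → Spec_number_of_sentences lengths (number_of_sentences lengths)

-- ===== LEMMAS AND PROOFS =====

-- A's loop over range(n): the accumulator ends at ([5*k for 500*k < n], n).
lemma loopA_closed (n : Nat) :
    (PySem.List.pyRange 0 (n : Int) 1).foldl
      (fun (p : List Int × Int) i =>
        if ¬ (PySem.Int.mod i 500 == 0) then (p.1, p.2 + 1)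
        else (p.1 ++ [PySem.Int.floordiv p.2 100], p.2 + 1))
      ([], 0)
    = ((List.range ((n + 499) / 500)).map (fun k : Nat => ((5 * k : Nat) : Int)), (n : Int)) := by
  induction n with
  | zero => simp [PySem.List.pyRange_one_eq_nil]
  | succ n ih =>
    rw [show ((n + 1 : Nat) : Int) = (n : Int) + 1 by push_cast; ring,
        PySem.List.pyRange_one_succ_right (by positivity),
        List.foldl_append, ih]
    by_cases h : n % 500 = 0
    · have hfd : PySem.Int.floordiv (n : Int) 100 = ((n / 100 : Nat) : Int) := by
        have := PySem.Int.floordiv_natCast n 100; push_cast at this; exact_mod_cast this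
      have hcnt : (n + 1 + 499) / 500 = (n + 499) / 500 + 1 := by omega
      simp [hcnt, List.range_succ]
      rw [if_pos (show (500 : Int) ∣ (n : Int) by omega)]
      rw [show ((n : Int)) / 100 = 5 * (((n : Int) + 499) / 500) by omega]
    · have hcnt : (n + 1 + 499) / 500 = (n + 499) / 500 := by omega
      simp [hcnt]
      omega

-- ===== VERDICT (by name: the statement is the Claim_ definition above) =====
theorem number_of_sentences_spec : Claim_equal_number_of_sentences := by
  intro lengths _
  simp only [Spec_number_of_sentences, number_of_sentences, number_of_sentences_alt]
  rw [loopA_closed lengths.length]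
  have hceil : -(PySem.Int.floordiv (-(lengths.length : Int)) 500)
      = (((lengths.length + 499) / 500 : Nat) : Int) := by
    rw [PySem.Int.neg_floordiv_neg_eq_iff_of_pos (by omega)]
    constructor <;> push_cast <;> omega
  rw [hceil,
      show (min (6 : Int) ((((lengths.length + 499) / 500 : Nat) : Int)))
          = ((min 6 ((lengths.length + 499) / 500) : Nat) : Int) by push_cast; omega,
      PySem.List.pyRange_zero_natCast,
      show (some (6 : Int)) = some (((6 : Nat) : Int)) from rfl,
      PySem.List.slice_to_natCast,
      ← List.map_take, List.take_range, List.map_map]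
  refine List.map_congr_left ?_
  intro k _
  simp
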